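-- pv_equiv track=rewrite | github.com/temperlang/temper | be-py/src/commonMain/resources/lang/temper/be/py/temper-core/temper_core/__init__.py | string_step
-- ===== SOURCE A (Python) =====
-- def string_next(s: str, i: int) -> int:
--     return min(len(s), i + 1)
--
-- def string_prev(s: str, i: int) -> int:
--     return max(0, i - 1)
--
-- def string_step(s: str, i: int, by: int) -> int:
--     if by >= 0:
--         for _ in range(by):
--             old_i = i
--             i = string_next(s, i)
--             if i == old_i:
--                 break
--     else:
--         for _ in range(-by):
--             old_i = i
--             i = string_prev(s, i)
--             if i == old_i:
--                 break
--     return i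
-- ===== SOURCE B (Python) =====
-- def string_step(s: str, i: int, by: int) -> int:
--     if by > 0:
--         return min(len(s), i + by)
--     elif by < 0:
--         return max(0, i + by)
--     else:
--         return i
-- ===== Notes on version B (the rewrite author's own statement) =====
-- stated objective: faster
-- what changed: Replaced the per-step clamping loop with a closed-form sign branch: min(len(s), i+by) for by>0, max(0, i+by) for by<0, i for by==0.
import Mathlib
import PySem

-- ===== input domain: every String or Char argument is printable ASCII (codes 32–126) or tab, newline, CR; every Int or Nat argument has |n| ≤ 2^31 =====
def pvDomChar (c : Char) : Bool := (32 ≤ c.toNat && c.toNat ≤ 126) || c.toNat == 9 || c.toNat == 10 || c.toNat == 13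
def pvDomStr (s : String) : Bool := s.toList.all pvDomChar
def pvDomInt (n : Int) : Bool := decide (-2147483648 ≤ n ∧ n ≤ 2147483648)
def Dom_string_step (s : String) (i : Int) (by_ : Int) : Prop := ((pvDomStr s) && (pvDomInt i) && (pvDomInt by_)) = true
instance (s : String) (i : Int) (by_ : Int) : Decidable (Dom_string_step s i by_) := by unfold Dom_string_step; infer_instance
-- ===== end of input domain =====

-- B replaces A's per-step clamping loop by a closed-form branch on the sign of by_ (faster).


-- ===== PORT A =====
def string_next (s : String) (i : Int) : Int := min (PySem.Str.len s) (i + 1)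

def string_prev (s : String) (i : Int) : Int := max 0 (i - 1)

-- A's forward loop: for _ in range(by): step, break if unchanged
def stepNextLoop (s : String) : Nat → Int → Int
  | 0, i => i
  | n + 1, i =>
    let old_i := i
    let i' := string_next s i
    if i' = old_i then i' else stepNextLoop s n i'

def stepPrevLoop (s : String) : Nat → Int → Int
  | 0, i => i
  | n + 1, i =>
    let old_i := i
    let i' := string_prev s i
    if i' = old_i then i' else stepPrevLoop s n i'

def string_step (s : String) (i : Int) (by_ : Int) : Int :=
  if by_ ≥ 0 then stepNextLoop s by_.toNat i
  else stepPrevLoop s (-by_).toNat i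

-- ===== PORT B =====
def string_step_alt (s : String) (i : Int) (by_ : Int) : Int :=
  if by_ > 0 then min (PySem.Str.len s) (i + by_)
  else if by_ < 0 then max 0 (i + by_)
  else i

-- ===== PRECONDITION & SPEC =====
def Spec_string_step (s : String) (i : Int) (by_ : Int) (out : Int) : Prop := out = string_step_alt s i by_
instance (s : String) (i : Int) (by_ : Int) (out : Int) : Decidable (Spec_string_step s i by_ out) := by unfold Spec_string_step; infer_instance

-- ===== CLAIM (what is proved, stated in full; the proofs are below) =====
def Claim_equal_string_step : Prop := ∀ (s : String) (i : Int) (by_ : Int), Dom_string_step s i by_ → Spec_string_step s i by_ (string_step s i by_)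

-- ===== LEMMAS AND PROOFS =====
theorem stepNextLoop_closed (s : String) (n : Nat) (i : Int) (hn : 1 ≤ n) :
    stepNextLoop s n i = min (PySem.Str.len s) (i + n) := by
  induction n generalizing i with
  | zero => omega
  | succ m ih =>
    simp only [stepNextLoop, string_next]
    by_cases hm : m = 0
    · subst hm
      simp only [stepNextLoop]
      split_ifs <;> push_cast <;> omega
    · split_ifs with h
      · -- i became stationary: min len (i+1) = i forces len = i
        push_cast
        omega
      · rw [ih _ (by omega)]
        push_cast at h ⊢
        omega

theorem stepPrevLoop_closed (s : String) (n : Nat) (i : Int) (hn : 1 ≤ n) :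
    stepPrevLoop s n i = max 0 (i - n) := by
  induction n generalizing i with
  | zero => omega
  | succ m ih =>
    simp only [stepPrevLoop, string_prev]
    by_cases hm : m = 0
    · subst hm
      simp only [stepPrevLoop]
      split_ifs <;> push_cast <;> omega
    · split_ifs with h
      · push_cast
        omega
      · rw [ih _ (by omega)]
        push_cast at h ⊢
        omega

-- ===== VERDICT (by name: the statement is the Claim_ definition above) =====
theorem string_step_spec : Claim_equal_string_step := by
  intro s i by_ _
  unfold Spec_string_step string_step string_step_alt
  by_cases h1 : by_ ≥ 0
  · rw [if_pos h1]
    by_cases h2 : by_ > 0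
    · rw [if_pos h2, stepNextLoop_closed s _ i (by omega)]
      congr 1
      omega
    · have hz : by_ = 0 := by omega
      subst hz
      simp [stepNextLoop]
  · rw [if_neg h1, if_neg (by omega : ¬ by_ > 0), if_pos (by omega : by_ < 0),
        stepPrevLoop_closed s _ i (by omega)]
    congr 1
    omega
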